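-- pv_equiv track=rewrite | github.com/ZhidongZhang-code/Z-Precise-alignment | old-Z-precise-alignment/整体流程整理.py | find_start_end_positions
-- ===== SOURCE A (Python) =====
-- def find_start_end_positions(alignment, sequence_id):
--     """
--     查找序列在多序列比对结果中的起始和结束位置。
--
--     Args:
--         alignment (dict): 多序列比对结果，格式为序列ID到序列的映射字典。
--         sequence_id (str): 要查找的序列ID。
--
--     Returns:
--         tuple: 起始位置和结束位置的元组。
--     """
--     start_position = None
--     end_position = None
--
--     # 找到序列的起始位置
--     for i in range(len(alignment[sequence_id])):
--         if alignment[sequence_id][i] != '-':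
--             start_position = i
--             break
--
--     # 找到序列的结束位置
--     for i in range(len(alignment[sequence_id]) - 1, -1, -1):
--         if alignment[sequence_id][i] != '-':
--             end_position = i
--             break
--
--     return start_position, end_position
-- ===== SOURCE B (Python) =====
-- def find_start_end_positions(alignment, sequence_id):
--     start_position = None
--     end_position = None
--     for i, ch in enumerate(alignment[sequence_id]):
--         if ch != '-':
--             end_position = i
--             if start_position is None:
--                 start_position = i
--     return start_position, end_position
-- ===== Notes on version B (the rewrite author's own statement) =====
-- stated objective: simpler
-- what changed: Replaces A's two directional early-exit index scans (forward for the first non-gap, backward for the last) with one forward enumerate pass maintaining both boundaries.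
import Mathlib
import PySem

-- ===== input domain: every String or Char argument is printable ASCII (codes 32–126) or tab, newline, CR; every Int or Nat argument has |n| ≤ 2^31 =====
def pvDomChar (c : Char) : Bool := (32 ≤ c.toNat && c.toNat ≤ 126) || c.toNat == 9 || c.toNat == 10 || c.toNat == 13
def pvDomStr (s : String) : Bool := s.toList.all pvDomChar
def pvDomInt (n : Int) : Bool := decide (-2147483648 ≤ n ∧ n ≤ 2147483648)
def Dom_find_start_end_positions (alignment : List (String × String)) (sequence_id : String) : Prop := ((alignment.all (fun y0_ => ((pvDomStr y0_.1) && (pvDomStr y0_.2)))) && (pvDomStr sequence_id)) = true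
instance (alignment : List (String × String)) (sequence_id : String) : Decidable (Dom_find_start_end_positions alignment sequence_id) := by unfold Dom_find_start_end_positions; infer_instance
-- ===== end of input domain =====

-- B replaces A's two directional early-exit scans with one forward pass maintaining both boundaries (simpler decomposition, same O(n) cost).


-- ===== PORT A =====
-- forward loop: 'for i in range(len(s)): if s[i] != '-': start_position = i; break'
def pvFindFwd (cs : List Char) (i : Int) : Option Int :=
  match cs with
  | [] => none
  | c :: rest => if c ≠ '-' then some i else pvFindFwd rest (i + 1)

-- backward loop: 'for i in range(len(s)-1, -1, -1): if s[i] != '-': end_position = i; break'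
-- transliterated as the descending-index scan over the reversed characters
def pvFindBwd (cs : List Char) (i : Int) : Option Int :=
  match cs with
  | [] => none
  | c :: rest => if c ≠ '-' then some i else pvFindBwd rest (i - 1)

def find_start_end_positions (alignment : List (String × String)) (sequence_id : String) : Option Int × Option Int :=
  let s := ((PySem.Dict.mk alignment).get? sequence_id).getD ""   -- Pre_ guarantees the key is present
  let cs := s.toList
  (pvFindFwd cs 0, pvFindBwd cs.reverse ((cs.length : Int) - 1))

-- ===== PORT B =====
-- single enumerate pass carrying (start_position, end_position)
def pvScan (cs : List Char) (i : Int) (st en : Option Int) : Option Int × Option Int :=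
  match cs with
  | [] => (st, en)
  | c :: rest =>
    if c ≠ '-' then pvScan rest (i + 1) (if st = none then some i else st) (some i)
    else pvScan rest (i + 1) st en

def find_start_end_positions_alt (alignment : List (String × String)) (sequence_id : String) : Option Int × Option Int :=
  let s := ((PySem.Dict.mk alignment).get? sequence_id).getD ""
  pvScan s.toList 0 none none

-- ===== PRECONDITION & SPEC =====
-- Pre_ excludes exactly the inputs where Python raises KeyError (sequence_id absent): both A and B raise there.
def Pre_find_start_end_positions (alignment : List (String × String)) (sequence_id : String) : Prop :=
  sequence_id ∈ alignment.map Prod.fst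

instance (alignment : List (String × String)) (sequence_id : String) : Decidable (Pre_find_start_end_positions alignment sequence_id) := by unfold Pre_find_start_end_positions; infer_instance

def pvWitness_find_start_end_positions : (List (String × String)) × String := ([("seq1", "--ab-c--")], "seq1")

def Spec_find_start_end_positions (alignment : List (String × String)) (sequence_id : String) (out : Option Int × Option Int) : Prop := out = find_start_end_positions_alt alignment sequence_id
instance (alignment : List (String × String)) (sequence_id : String) (out : Option Int × Option Int) : Decidable (Spec_find_start_end_positions alignment sequence_id out) := by unfold Spec_find_start_end_positions; infer_instance

-- ===== CLAIM (what is proved, stated in full; the proofs are below) =====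
def Claim_equal_find_start_end_positions : Prop := ∀ (alignment : List (String × String)) (sequence_id : String), Dom_find_start_end_positions alignment sequence_id → Pre_find_start_end_positions alignment sequence_id → Spec_find_start_end_positions alignment sequence_id (find_start_end_positions alignment sequence_id)

-- ===== LEMMAS AND PROOFS =====

-- first component of B's scan: A's forward search, shielded by an already-found start
theorem pvScan_fst (cs : List Char) (i : Int) (st en : Option Int) :
    (pvScan cs i st en).1 = st.or (pvFindFwd cs i) := by
  induction cs generalizing i st en with
  | nil => simp [pvScan, pvFindFwd]
  | cons c rest ih =>
    by_cases h : c = '-'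
    · simp [pvScan, pvFindFwd, h, ih]
    · simp only [pvScan, pvFindFwd, if_pos h, ih]
      cases st <;> simp

-- backward search splits over an append
theorem pvFindBwd_append (xs ys : List Char) (i : Int) :
    pvFindBwd (xs ++ ys) i = (pvFindBwd xs i).or (pvFindBwd ys (i - xs.length)) := by
  induction xs generalizing i with
  | nil => simp [pvFindBwd]
  | cons c rest ih =>
    by_cases h : c ≠ '-'
    · simp [pvFindBwd, h]
    · simp only [List.cons_append, pvFindBwd, if_neg h, ih]
      have : (i - 1 - (rest.length : Int)) = i - ((c :: rest).length : Int) := by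
        simp only [List.length_cons]; push_cast; ring
      rw [this]

-- second component of B's scan: A's backward search with 'en' as the fallback
theorem pvScan_snd (cs : List Char) (i : Int) (st en : Option Int) :
    (pvScan cs i st en).2 = (pvFindBwd cs.reverse (i + cs.length - 1)).or en := by
  induction cs generalizing i st en with
  | nil => simp [pvScan, pvFindBwd]
  | cons c rest ih =>
    have hlen : (i + ((c :: rest).length : Int) - 1) = (i + 1) + rest.length - 1 := by
      simp only [List.length_cons]; push_cast; ring
    have hidx : ((i + 1) + (rest.length : Int) - 1 - rest.reverse.length) = i := by
      rw [List.length_reverse]; ring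
    rw [List.reverse_cons, hlen, pvFindBwd_append, hidx]
    by_cases h : c ≠ '-'
    · simp only [pvScan, ih, pvFindBwd, if_pos h]
      rw [Option.or_assoc]
      cases pvFindBwd rest.reverse ((i + 1) + rest.length - 1) <;> simp
    · simp only [pvScan, if_neg h, ih, pvFindBwd]
      simp [h]

-- ===== VERDICT (by name: the statement is the Claim_ definition above) =====
theorem find_start_end_positions_spec : Claim_equal_find_start_end_positions := by
  intro alignment sequence_id _ _
  unfold Spec_find_start_end_positions find_start_end_positions find_start_end_positions_alt
  have h1 := pvScan_fst (((PySem.Dict.mk alignment).get? sequence_id).getD "").toList 0 none none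
  have h2 := pvScan_snd (((PySem.Dict.mk alignment).get? sequence_id).getD "").toList 0 none none
  refine Prod.ext ?_ ?_
  · rw [h1]; simp
  · rw [h2]; simp
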